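-- pv_equiv track=rewrite | github.com/cybersecurityipb/hacktoday2024 | qual/cry/Split and Splice/solver.py | grey_v2_reversed
-- ===== SOURCE A (Python) =====
-- def grey_v2_reversed(x):
--     x = bin(x)[2:]
--     x = [int(i) for i in x]
--     n = []
--     n.append(x[0])
--     n.append(x[1]^x[0])
--     for i in range(len(x)-2):
--         n.append(x[i+2]^n[i]^n[i+1])
--     n = [str(i) for i in n]
--     n = ''.join(n)
--     return int(n, 2)
-- ===== SOURCE B (Python) =====
-- def grey_v2_reversed(x):
--     bits = [int(c) for c in bin(x)[2:]]
--     # Rotating residue-class XOR accumulators: at step k, u/v/w hold the XOR of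
--     # bits[j] for j < k with j % 3 == k % 3 / (k+1) % 3 / (k+2) % 3 respectively,
--     # and total is the XOR of all bits so far.  The output bit at k equals
--     # total ^ (class of residue (k-2) % 3), i.e. total ^ v after updating u/total.
--     u = v = w = 0
--     total = 0
--     out = 0
--     for b in bits:
--         u ^= b
--         total ^= b
--         out = out * 2 + (total ^ v)
--         u, v, w = v, w, u
--     return out
-- ===== Notes on version B (the rewrite author's own statement) =====
-- stated objective: alternative
-- what changed: Replaces A's two-term recurrence n[k]=x[k]^n[k-2]^n[k-1] over a growing index-accessed list by a single pass with three rotating prefix-XOR accumulators partitioned by index mod 3 plus a total prefix XOR, emitting each output bit as total ^ class[(k-2)%3] and accumulating the integer directly (no intermediate list, no string join/parse).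
-- outside the precondition, e.g. on grey_v2_reversed(0): A raises IndexError, B returns 0; on grey_v2_reversed(1): A raises IndexError, B returns 1; on grey_v2_reversed(-5): A raises ValueError, B raises ValueError
import Mathlib
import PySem

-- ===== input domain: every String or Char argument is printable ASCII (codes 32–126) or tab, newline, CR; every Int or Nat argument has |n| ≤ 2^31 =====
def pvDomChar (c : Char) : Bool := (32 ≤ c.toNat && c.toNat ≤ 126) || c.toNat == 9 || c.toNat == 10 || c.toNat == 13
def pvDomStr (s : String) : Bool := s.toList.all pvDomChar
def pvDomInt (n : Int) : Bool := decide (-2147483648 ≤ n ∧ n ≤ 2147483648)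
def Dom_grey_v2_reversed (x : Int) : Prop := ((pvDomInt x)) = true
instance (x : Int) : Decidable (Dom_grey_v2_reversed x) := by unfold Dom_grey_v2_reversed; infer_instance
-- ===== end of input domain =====

-- B replaces A's two-term recurrence over an index-accessed growing list by a single pass
-- with rotating mod-3 prefix-XOR class accumulators (alternative decomposition, same cost).

-- ===== PORT A =====
-- bin(x)[2:] as a list of 0/1 digits, MSB first; exact for x ≥ 0 (bin(0)[2:] = "0");
-- for x < 0 Python's later int('b…') raises ValueError, excluded by Pre_.
def pvBitsGo : Nat → Nat → List Int
  | 0, _ => []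
  | fuel + 1, n => if n = 0 then [] else pvBitsGo fuel (n / 2) ++ [((n % 2 : Nat) : Int)]

def pvBin (x : Int) : List Int := if x ≤ 0 then [0] else pvBitsGo x.toNat x.toNat

def grey_v2_reversed (x : Int) : Int :=
  let xs := pvBin x                                   -- x = [int(i) for i in bin(x)[2:]]
  let n : List Int := []
  let n := n ++ [PySem.List.pyGetD xs 0 0]            -- n.append(x[0]); in range under Pre_
  let n := n ++ [PySem.Int.bxor (PySem.List.pyGetD xs 1 0) (PySem.List.pyGetD n 0 0)]
                                                      -- n.append(x[1]^x[0]); in range under Pre_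
  let n := (PySem.List.pyRange 0 ((xs.length : Int) - 2) 1).foldl
    (fun n i => n ++ [PySem.Int.bxor (PySem.Int.bxor (PySem.List.pyGetD xs (i + 2) 0)
        (PySem.List.pyGetD n i 0)) (PySem.List.pyGetD n (i + 1) 0)]) n
  n.foldl (fun acc d => 2 * acc + d) 0                -- int(''.join(map(str, n)), 2); exact for 0/1 digits

-- ===== PORT B =====
def grey_v2_reversed_alt (x : Int) : Int :=
  let bits := pvBin x
  let s := bits.foldl
    (fun (s : Int × Int × Int × Int × Int) b =>
      let (u, v, w, total, out) := s
      let u := PySem.Int.bxor u b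
      let total := PySem.Int.bxor total b
      let out := out * 2 + PySem.Int.bxor total v
      (v, w, u, total, out))
    (0, 0, 0, 0, 0)
  s.2.2.2.2

-- ===== PRECONDITION & SPEC =====
-- A raises on every x < 2 (ValueError on negatives from int('b…'), IndexError on x[1] for x ∈ {0,1}).
def Pre_grey_v2_reversed (x : Int) : Prop := 2 ≤ x
instance (x : Int) : Decidable (Pre_grey_v2_reversed x) := by unfold Pre_grey_v2_reversed; infer_instance
def pvWitness_grey_v2_reversed : Int := (2)

def Spec_grey_v2_reversed (x : Int) (out : Int) : Prop := out = grey_v2_reversed_alt x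
instance (x : Int) (out : Int) : Decidable (Spec_grey_v2_reversed x out) := by unfold Spec_grey_v2_reversed; infer_instance

-- ===== CLAIM (what is proved, stated in full; the proofs are below) =====
def Claim_equal_grey_v2_reversed : Prop := ∀ (x : Int), Dom_grey_v2_reversed x → Pre_grey_v2_reversed x → Spec_grey_v2_reversed x (grey_v2_reversed x)
-- ===== LEMMAS AND PROOFS =====

-- reference form of A's loop: remaining digits from carried pair (n[k-2], n[k-1])
def aTail (a b : Int) : List Int → List Int
  | [] => []
  | c :: t => PySem.Int.bxor (PySem.Int.bxor c a) b ::
      aTail b (PySem.Int.bxor (PySem.Int.bxor c a) b) t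

-- last two entries of a :: b :: aTail a b t
def aPair (a b : Int) : List Int → Int × Int
  | [] => (a, b)
  | c :: t => aPair b (PySem.Int.bxor (PySem.Int.bxor c a) b) t

def is01 (a : Int) : Prop := a = 0 ∨ a = 1

theorem is01_bxor {a b : Int} (ha : is01 a) (hb : is01 b) : is01 (PySem.Int.bxor a b) := by
  rcases ha with ha | ha <;> rcases hb with hb | hb <;> subst ha <;> subst hb <;>
    first | exact Or.inl (by decide) | exact Or.inr (by decide)

theorem pvBitsGo_is01 : ∀ fuel n : Nat, ∀ y ∈ pvBitsGo fuel n, is01 y := by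
  intro fuel
  induction fuel with
  | zero => intro n y hy; simp [pvBitsGo] at hy
  | succ fuel ih =>
    intro n y hy
    rw [pvBitsGo] at hy
    by_cases hn : n = 0
    · rw [if_pos hn] at hy; simp at hy
    · rw [if_neg hn] at hy
      rcases List.mem_append.1 hy with h | h
      · exact ih (n / 2) y h
      · simp at h
        subst h
        unfold is01
        omega

theorem pvBitsGo_ne_nil : ∀ fuel n : Nat, 1 ≤ n → n ≤ fuel → pvBitsGo fuel n ≠ [] := by
  intro fuel n h1 h2
  cases fuel with
  | zero => omega
  | succ fuel =>
    rw [pvBitsGo, if_neg (by omega)]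
    simp

theorem pvBitsGo_len2 (fuel n : Nat) (hn : 2 ≤ n) (hf : n ≤ fuel) : 2 ≤ (pvBitsGo fuel n).length := by
  cases fuel with
  | zero => omega
  | succ fuel =>
    rw [pvBitsGo, if_neg (by omega)]
    have h1 : pvBitsGo fuel (n / 2) ≠ [] := pvBitsGo_ne_nil fuel (n / 2) (by omega) (by omega)
    have : 1 ≤ (pvBitsGo fuel (n / 2)).length := by
      cases h : pvBitsGo fuel (n / 2) with
      | nil => exact absurd h h1
      | cons a l => simp
    simp only [List.length_append, List.length_cons, List.length_nil]
    omega

-- getD of the reference list at positions t.length and t.length + 1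
theorem aTail_getD (t : List Int) : ∀ a b : Int,
    (a :: b :: aTail a b t).getD t.length 0 = (aPair a b t).1 ∧
    (a :: b :: aTail a b t).getD (t.length + 1) 0 = (aPair a b t).2 := by
  induction t with
  | nil => intro a b; simp [aTail, aPair, List.getD]
  | cons c t ih =>
    intro a b
    have := ih b (PySem.Int.bxor (PySem.Int.bxor c a) b)
    simpa [aTail, aPair, List.getD] using this

theorem aTail_append (t : List Int) : ∀ a b c : Int,
    aTail a b (t ++ [c]) =
      aTail a b t ++ [PySem.Int.bxor (PySem.Int.bxor c (aPair a b t).1) (aPair a b t).2] := by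
  induction t with
  | nil => intro a b c; simp [aTail, aPair]
  | cons d t ih =>
    intro a b c
    simp only [List.cons_append, aTail, aPair, List.cons.injEq, true_and]
    exact ih _ _ _

-- A's loop builds exactly the reference list
theorem aLoop_eq (x0 x1 : Int) (rest : List Int) :
    ∀ (M : Nat), M ≤ rest.length → ∀ n0 n1 : Int,
    (PySem.List.pyRange 0 (M : Int) 1).foldl
      (fun n i => n ++ [PySem.Int.bxor (PySem.Int.bxor
          (PySem.List.pyGetD (x0 :: x1 :: rest) (i + 2) 0)
          (PySem.List.pyGetD n i 0)) (PySem.List.pyGetD n (i + 1) 0)]) [n0, n1]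
      = n0 :: n1 :: aTail n0 n1 (rest.take M) := by
  intro M
  induction M with
  | zero =>
    intro _ n0 n1
    rw [PySem.List.pyRange_one_eq_nil (by norm_num)]
    simp [aTail]
  | succ M ih =>
    intro hM n0 n1
    have hM' : M ≤ rest.length := by omega
    have hsplit : ((M + 1 : Nat) : Int) = (M : Int) + 1 := by push_cast; ring
    rw [hsplit, PySem.List.pyRange_one_succ_right (by positivity), List.foldl_append,
      ih hM' n0 n1]
    simp only [List.foldl_cons, List.foldl_nil]
    -- index facts
    have hlen : (rest.take M).length = M := List.length_take_of_le hM'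
    have hx : PySem.List.pyGetD (x0 :: x1 :: rest) ((M : Int) + 2) 0 = rest.getD M 0 := by
      have : ((M : Int) + 2) = ((M + 2 : Nat) : Int) := by push_cast; ring
      rw [this, PySem.List.pyGetD_natCast]
      simp [List.getD]
    have hgp := aTail_getD (rest.take M) n0 n1
    rw [hlen] at hgp
    have hg1 : PySem.List.pyGetD (n0 :: n1 :: aTail n0 n1 (rest.take M)) (M : Int) 0
        = (aPair n0 n1 (rest.take M)).1 := by
      rw [PySem.List.pyGetD_natCast]; exact hgp.1
    have hg2 : PySem.List.pyGetD (n0 :: n1 :: aTail n0 n1 (rest.take M)) ((M : Int) + 1) 0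
        = (aPair n0 n1 (rest.take M)).2 := by
      have : ((M : Int) + 1) = ((M + 1 : Nat) : Int) := by push_cast; ring
      rw [this, PySem.List.pyGetD_natCast]; exact hgp.2
    rw [hx, hg1, hg2]
    have htake : rest.take (M + 1) = rest.take M ++ [rest.getD M 0] := by
      have hM2 : M < rest.length := by omega
      rw [List.take_add_one]
      congr 1
      simp [List.getElem?_eq_getElem hM2, List.getD]
    rw [htake, aTail_append]
    simp

-- the {0,1} xor facts used in the main induction step
theorem key_eqs (c u v w : Int) (hc : is01 c) (hu : is01 u) (hv : is01 v) (hw : is01 w)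
    (total a b : Int)
    (ht : total = PySem.Int.bxor (PySem.Int.bxor u v) w)
    (ha : a = PySem.Int.bxor total w) (hb : b = PySem.Int.bxor total u) :
    PySem.Int.bxor (PySem.Int.bxor c a) b = PySem.Int.bxor (PySem.Int.bxor total c) v ∧
    PySem.Int.bxor total c = PySem.Int.bxor (PySem.Int.bxor v w) (PySem.Int.bxor u c) ∧
    b = PySem.Int.bxor (PySem.Int.bxor total c) (PySem.Int.bxor u c) := by
  subst ht ha hb
  rcases hc with hc | hc <;> rcases hu with hu | hu <;> rcases hv with hv | hv <;>
    rcases hw with hw | hw <;> subst hc <;> subst hu <;> subst hv <;> subst hw <;>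
    refine ⟨by decide, by decide, by decide⟩

-- main correspondence: B's fold from an invariant state computes A's reference digits
theorem bfold_eq (t : List Int) : ∀ (h01 : ∀ y ∈ t, is01 y) (u v w total out a b : Int)
    (hu : is01 u) (hv : is01 v) (hw : is01 w)
    (ht : total = PySem.Int.bxor (PySem.Int.bxor u v) w)
    (ha : a = PySem.Int.bxor total w) (hb : b = PySem.Int.bxor total u),
    (t.foldl
      (fun (s : Int × Int × Int × Int × Int) b =>
        let (u, v, w, total, out) := s
        let u := PySem.Int.bxor u b
        let total := PySem.Int.bxor total b
        let out := out * 2 + PySem.Int.bxor total v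
        (v, w, u, total, out))
      (u, v, w, total, out)).2.2.2.2
    = (aTail a b t).foldl (fun acc d => 2 * acc + d) out := by
  induction t with
  | nil => intro _ u v w total out a b _ _ _ _ _ _; simp [aTail]
  | cons c t ih =>
    intro h01 u v w total out a b hu hv hw ht ha hb
    have hc : is01 c := h01 c (List.mem_cons_self ..)
    obtain ⟨e1, e2, e3⟩ := key_eqs c u v w hc hu hv hw total a b ht ha hb
    simp only [List.foldl_cons, aTail]
    rw [e1]
    have hout : 2 * out + PySem.Int.bxor (PySem.Int.bxor total c) v
        = out * 2 + PySem.Int.bxor (PySem.Int.bxor total c) v := by ring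
    rw [hout]
    exact ih (fun y hy => h01 y (List.mem_cons_of_mem _ hy)) v w
      (PySem.Int.bxor u c) (PySem.Int.bxor total c)
      (out * 2 + PySem.Int.bxor (PySem.Int.bxor total c) v) b
      (PySem.Int.bxor (PySem.Int.bxor total c) v)
      hv hw (is01_bxor hu hc) e2 e3 rfl

theorem zero_bxor (a : Int) : PySem.Int.bxor 0 a = a := by
  rw [PySem.Int.bxor_comm]; exact PySem.Int.bxor_zero a

theorem bxor_cancel_right (a b : Int) (ha : is01 a) (hb : is01 b) :
    PySem.Int.bxor (PySem.Int.bxor a b) b = a := by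
  rcases ha with ha | ha <;> rcases hb with hb | hb <;> subst ha <;> subst hb <;> decide

-- ===== VERDICT (by name: the statement is the Claim_ definition above) =====
theorem grey_v2_reversed_spec : Claim_equal_grey_v2_reversed := by
  intro x _ hpre
  unfold Pre_grey_v2_reversed at hpre
  unfold Spec_grey_v2_reversed grey_v2_reversed grey_v2_reversed_alt
  have hxpos : ¬ x ≤ 0 := by omega
  have hbin : pvBin x = pvBitsGo x.toNat x.toNat := by unfold pvBin; rw [if_neg hxpos]
  have h01 : ∀ y ∈ pvBin x, is01 y := by rw [hbin]; exact pvBitsGo_is01 _ _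
  have hlen : 2 ≤ (pvBin x).length := by
    rw [hbin]; exact pvBitsGo_len2 _ _ (by omega) le_rfl
  obtain ⟨x0, x1, rest, hxs⟩ : ∃ x0 x1 rest, pvBin x = x0 :: x1 :: rest := by
    cases h : pvBin x with
    | nil => rw [h] at hlen; simp at hlen
    | cons a l =>
      cases l with
      | nil => rw [h] at hlen; simp at hlen
      | cons b l' => exact ⟨a, b, l', rfl⟩
  rw [hxs] at h01
  have hx0 : is01 x0 := h01 x0 (by simp)
  have hx1 : is01 x1 := h01 x1 (by simp)
  have hrest : ∀ y ∈ rest, is01 y := fun y hy => h01 y (by simp [hy])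
  simp only [hxs]
  have e0 : PySem.List.pyGetD (x0 :: x1 :: rest) 0 0 = x0 := by
    simp [PySem.List.pyGetD_zero_cons]
  have e1 : PySem.List.pyGetD (x0 :: x1 :: rest) 1 0 = x1 := by
    rw [show (1 : Int) = ((1 : Nat) : Int) by norm_num, PySem.List.pyGetD_natCast]
    simp [List.getD]
  simp only [List.nil_append, e0, e1, PySem.List.pyGetD_zero_cons, List.singleton_append]
  have harg : ((x0 :: x1 :: rest).length : Int) - 2 = ((rest.length : Nat) : Int) := by
    simp; ring
  rw [harg, aLoop_eq x0 x1 rest rest.length le_rfl x0 (PySem.Int.bxor x1 x0), List.take_length]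
  have ht' : PySem.Int.bxor x0 x1 = PySem.Int.bxor (PySem.Int.bxor 0 x0) x1 := by
    rw [zero_bxor]
  have ha' : x0 = PySem.Int.bxor (PySem.Int.bxor x0 x1) x1 :=
    (bxor_cancel_right x0 x1 hx0 hx1).symm
  have hb' : PySem.Int.bxor x1 x0 = PySem.Int.bxor (PySem.Int.bxor x0 x1) 0 := by
    rw [PySem.Int.bxor_zero, PySem.Int.bxor_comm]
  simp only [List.foldl_cons, PySem.Int.bxor_zero, zero_bxor, zero_mul, mul_zero, zero_add]
  rw [bfold_eq rest hrest 0 x0 x1 (PySem.Int.bxor x0 x1) (x0 * 2 + PySem.Int.bxor x0 x1) x0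
    (PySem.Int.bxor x1 x0) (Or.inl rfl) hx0 hx1 ht' ha' hb']
  congr 1
  rw [PySem.Int.bxor_comm x1 x0]
  ring
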